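-- pv_equiv track=rewrite | github.com/sayyad-shahin/AI-Voice-IVR-System | backend/services/rephrase.py | rephrase_text
-- ===== SOURCE A (Python) =====
-- def rephrase_text(text):
--
--     replacements={
--
--     "i want":"I would like",
--     "give me":"Please provide",
--     "tell me":"Could you tell me",
--     "send me":"Kindly send",
--     "show me":"Please show"
--
--     }
--
--     for k,v in replacements.items():
--         text=text.replace(k,v)
--
--     return text.capitalize()
-- ===== SOURCE B (Python) =====
-- def rephrase_text(text):
--     replacements = {
--         "i want": "I would like",
--         "give me": "Please provide",
--         "tell me": "Could you tell me",
--         "send me": "Kindly send",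
--         "show me": "Please show",
--     }
--     # one left-to-right pass: at each position emit a replacement value (and
--     # skip the matched key) or copy the character
--     out = []
--     i = 0
--     n = len(text)
--     while i < n:
--         for k, v in replacements.items():
--             if text.startswith(k, i):
--                 out.append(v)
--                 i += len(k)
--                 break
--         else:
--             out.append(text[i])
--             i += 1
--     return "".join(out).capitalize()
-- ===== Notes on version B (the rewrite author's own statement) =====
-- stated objective: alternative
-- what changed: A runs five sequential full-text str.replace passes (one per phrase); B makes a single left-to-right scan that at each position matches one of the five keys (emitting its value and skipping it) or copies the character, then capitalizes; the results coincide because the keys never overlap and no value re-introduces a later key.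
import Mathlib
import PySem

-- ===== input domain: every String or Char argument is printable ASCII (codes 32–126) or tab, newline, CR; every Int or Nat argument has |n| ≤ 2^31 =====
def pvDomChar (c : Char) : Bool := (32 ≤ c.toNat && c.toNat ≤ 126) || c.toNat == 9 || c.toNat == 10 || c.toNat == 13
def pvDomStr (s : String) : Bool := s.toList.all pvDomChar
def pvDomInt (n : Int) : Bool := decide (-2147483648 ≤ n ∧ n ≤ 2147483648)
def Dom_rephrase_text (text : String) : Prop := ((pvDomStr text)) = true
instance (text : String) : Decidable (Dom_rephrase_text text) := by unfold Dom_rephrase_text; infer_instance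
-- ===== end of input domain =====

-- B replaces A's five sequential full-text str.replace passes by ONE left-to-right scan that
-- matches the five keys at each position (objective: alternative single-pass algorithm; same results
-- because the keys never overlap and no value re-introduces a later key).

-- str.capitalize(): first char uppercased, rest lowercased — ported by hand (exact on the ASCII domain)
def pyCapitalizeChars : List Char → List Char
  | [] => []
  | c :: t => PySem.Chars.upperChar c :: t.map PySem.Chars.lowerChar

def pyCapitalize (s : String) : String := String.ofList (pyCapitalizeChars s.toList)

-- ===== PORT A =====
def rephrase_text (text : String) : String :=
  let replacements : PySem.Dict String String :=
    (((((PySem.Dict.empty.insert "i want" "I would like").insert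
        "give me" "Please provide").insert
        "tell me" "Could you tell me").insert
        "send me" "Kindly send").insert
        "show me" "Please show")
  let text := replacements.items.foldl (fun t kv => PySem.Str.replace t kv.1 kv.2) text
  pyCapitalize text

-- ===== PORT B =====
-- the while-loop of Source B: one pass over the characters; at each position try the five keys in
-- dict order (text.startswith(k, i)), emit the value and skip the key, else copy the character
def bScan : List Char → List Char
  | [] => []
  | c :: t =>
    if "i want".toList.isPrefixOf (c :: t) then "I would like".toList ++ bScan (t.drop 5)
    else if "give me".toList.isPrefixOf (c :: t) then "Please provide".toList ++ bScan (t.drop 6)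
    else if "tell me".toList.isPrefixOf (c :: t) then "Could you tell me".toList ++ bScan (t.drop 6)
    else if "send me".toList.isPrefixOf (c :: t) then "Kindly send".toList ++ bScan (t.drop 6)
    else if "show me".toList.isPrefixOf (c :: t) then "Please show".toList ++ bScan (t.drop 6)
    else c :: bScan t
termination_by s => s.length
decreasing_by all_goals (simp [List.length_drop]; try omega)

def rephrase_text_alt (text : String) : String :=
  pyCapitalize (String.ofList (bScan text.toList))

-- ===== PRECONDITION & SPEC =====
def Spec_rephrase_text (text : String) (out : String) : Prop := out = rephrase_text_alt text
instance (text : String) (out : String) : Decidable (Spec_rephrase_text text out) := by unfold Spec_rephrase_text; infer_instance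

-- ===== CLAIM (what is proved, stated in full; the proofs are below) =====
def Claim_equal_rephrase_text : Prop := ∀ (text : String), Dom_rephrase_text text → Spec_rephrase_text text (rephrase_text text)

-- ===== LEMMAS AND PROOFS =====

-- natural recursion equivalent of PySem.Chars.replace for a nonempty pattern
def repl (old new : List Char) : List Char → List Char
  | [] => []
  | c :: t =>
    if old.isPrefixOf (c :: t) ∧ 0 < old.length then
      new ++ repl old new (t.drop (old.length - 1))
    else c :: repl old new t
termination_by s => s.length
decreasing_by all_goals (simp [List.length_drop]; try omega)

theorem repl_nil (old new : List Char) : repl old new [] = [] := by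
  rw [repl]

theorem repl_pos (old new : List Char) (c : Char) (t : List Char)
    (h : old <+: (c :: t)) (h0 : 0 < old.length) :
    repl old new (c :: t) = new ++ repl old new (t.drop (old.length - 1)) := by
  rw [repl]
  rw [if_pos ⟨List.isPrefixOf_iff_prefix.mpr h, h0⟩]

theorem repl_neg (old new : List Char) (c : Char) (t : List Char)
    (h : ¬ old <+: (c :: t)) :
    repl old new (c :: t) = c :: repl old new t := by
  rw [repl]
  rw [if_neg (fun hb => h (List.isPrefixOf_iff_prefix.mp hb.1))]

theorem go_eq (old new : List Char) (hne : old ≠ []) :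
    ∀ fuel l acc, l.length ≤ fuel →
      PySem.Chars.replace.go old new fuel l acc = acc.reverse ++ repl old new l := by
  intro fuel
  induction fuel with
  | zero =>
    intro l acc hl
    have : l = [] := List.eq_nil_of_length_eq_zero (Nat.le_zero.mp hl)
    subst this
    simp [PySem.Chars.replace.go, repl_nil]
  | succ n ih =>
    intro l acc hl
    match l with
    | [] => simp [PySem.Chars.replace.go, repl_nil]
    | c :: t =>
      have h0 : 0 < old.length := List.length_pos_iff.mpr hne
      by_cases hp : old.isPrefixOf (c :: t)
      · have hpre : old <+: (c :: t) := List.isPrefixOf_iff_prefix.mp hp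
        have hdrop : List.drop old.length (c :: t) = t.drop (old.length - 1) := by
          obtain ⟨m, hm⟩ : ∃ m, old.length = m + 1 := ⟨old.length - 1, by omega⟩
          rw [hm, List.drop_succ_cons]
          simp
        rw [PySem.Chars.replace.go, if_pos hp, hdrop,
          ih (t.drop (old.length - 1)) (new.reverse ++ acc) (by simp at hl ⊢; omega),
          repl_pos old new c t hpre h0]
        simp
      · rw [PySem.Chars.replace.go, if_neg hp, ih t (c :: acc) (by simp at hl; omega),
          repl_neg old new c t (fun hb => hp (List.isPrefixOf_iff_prefix.mpr hb))]
        simp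

theorem replace_eq_repl (s old new : List Char) (hne : old ≠ []) :
    PySem.Chars.replace s old new = repl old new s := by
  rw [PySem.Chars.replace]
  simp only [List.isEmpty_iff]
  rw [if_neg hne]
  simpa using go_eq old new hne s.length s [] le_rfl

-- no nonempty suffix w of `pre` satisfies k <+: w or w <+: k:
-- then a replace of k skips over `pre` unchanged, whatever follows
def noCross (pre k : List Char) : Bool :=
  pre.tails.all (fun w => w.isEmpty || (!(k.isPrefixOf w) && !(w.isPrefixOf k)))

theorem noCross_spec {pre k : List Char} (h : noCross pre k = true) :
    ∀ w, w <:+ pre → w ≠ [] → ¬ k <+: w ∧ ¬ w <+: k := by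
  intro w hw hne
  have := List.all_eq_true.mp h w (by simpa [List.mem_tails] using hw)
  simp only [Bool.or_eq_true, List.isEmpty_iff, hne, Bool.and_eq_true,
    Bool.not_eq_true', false_or] at this
  exact ⟨fun hb => by simp [List.isPrefixOf_iff_prefix.mpr hb] at this,
    fun hb => by simp [List.isPrefixOf_iff_prefix.mpr hb] at this⟩

theorem repl_skip (old new pre : List Char) (h : noCross pre old = true) :
    ∀ u, repl old new (pre ++ u) = pre ++ repl old new u := by
  induction pre with
  | nil => intro u; simp
  | cons c p ih =>
    intro u
    have hnp : ¬ old <+: ((c :: p) ++ u) := by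
      intro hpre
      have h2 : (c :: p) <+: ((c :: p) ++ u) := List.prefix_append _ _
      have hd := noCross_spec h (c :: p) List.suffix_rfl (by simp)
      rcases List.prefix_or_prefix_of_prefix hpre h2 with h3 | h3
      · exact hd.1 h3
      · exact hd.2 h3
    rw [List.cons_append, repl_neg old new c (p ++ u) hnp,
      ih (by
        apply List.all_eq_true.mpr
        intro w hw
        exact List.all_eq_true.mp h w (by
          simp only [List.mem_tails] at hw ⊢
          exact hw.trans (List.suffix_cons c p)))]
    simp

theorem repl_append_self (old new u : List Char) (hne : old ≠ []) :
    repl old new (old ++ u) = new ++ repl old new u := by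
  match old, hne with
  | c :: o, _ =>
    rw [List.cons_append, repl_pos (c :: o) new c (o ++ u) (by simp [List.prefix_append]) (by simp)]
    congr 2
    simp

-- no nonempty suffix w of k' satisfies w <+: v or v <+: w: then replacing by value v
-- cannot create an occurrence of k' at the front of the text
def noReintro (k' v : List Char) : Bool :=
  k'.tails.all (fun w => w.isEmpty || (!(w.isPrefixOf v) && !(v.isPrefixOf w)))

theorem noReintro_spec {k' v : List Char} (h : noReintro k' v = true) :
    ∀ w, w <:+ k' → w ≠ [] → ¬ w <+: v ∧ ¬ v <+: w := by
  intro w hw hne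
  have := List.all_eq_true.mp h w (by simpa [List.mem_tails] using hw)
  simp only [Bool.or_eq_true, List.isEmpty_iff, hne, Bool.and_eq_true,
    Bool.not_eq_true', false_or] at this
  exact ⟨fun hb => by simp [List.isPrefixOf_iff_prefix.mpr hb] at this,
    fun hb => by simp [List.isPrefixOf_iff_prefix.mpr hb] at this⟩

theorem repl_head (old v k' : List Char) (hSC : noReintro k' v = true) :
    ∀ n s w, s.length ≤ n → w <:+ k' → w ≠ [] → ¬ w <+: s → ¬ w <+: repl old v s := by
  intro n
  induction n with
  | zero =>
    intro s w hl hw hne hns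
    have : s = [] := List.eq_nil_of_length_eq_zero (Nat.le_zero.mp hl)
    subst this
    rw [repl_nil]
    intro hx
    exact hne (List.prefix_nil.mp hx)
  | succ m ih =>
    intro s w hl hw hne hns
    match s with
    | [] =>
      rw [repl_nil]
      intro hx
      exact hne (List.prefix_nil.mp hx)
    | c :: t =>
      by_cases hp : old <+: (c :: t) ∧ 0 < old.length
      · rw [repl_pos old v c t hp.1 hp.2]
        intro hx
        have hd := noReintro_spec hSC w hw hne
        rcases List.prefix_or_prefix_of_prefix hx (List.prefix_append v _) with h3 | h3
        · exact hd.1 h3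
        · exact hd.2 h3
      · have hrw : repl old v (c :: t) = c :: repl old v t := by
          rw [repl]
          rw [if_neg (fun hb => hp ⟨List.isPrefixOf_iff_prefix.mp hb.1, hb.2⟩)]
        rw [hrw]
        match w, hne with
        | a :: w', _ =>
          intro hx
          rcases List.cons_prefix_cons.mp hx with ⟨rfl, hx'⟩
          by_cases hw' : w' = []
          · subst hw'
            exact hns (List.cons_prefix_cons.mpr ⟨rfl, List.nil_prefix⟩)
          · have hnt : ¬ w' <+: t := fun hb => hns (List.cons_prefix_cons.mpr ⟨rfl, hb⟩)
            exact ih t w' (by simp at hl; omega)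
              ((List.suffix_cons a w').trans hw) hw' hnt hx'

-- the five keys and values
def K1 : List Char := "i want".toList
def V1 : List Char := "I would like".toList
def K2 : List Char := "give me".toList
def V2 : List Char := "Please provide".toList
def K3 : List Char := "tell me".toList
def V3 : List Char := "Could you tell me".toList
def K4 : List Char := "send me".toList
def V4 : List Char := "Kindly send".toList
def K5 : List Char := "show me".toList
def V5 : List Char := "Please show".toList

def seqL (l : List Char) : List Char :=
  repl K5 V5 (repl K4 V4 (repl K3 V3 (repl K2 V2 (repl K1 V1 l))))

-- bScan's six branches as equations
theorem bScan_nil : bScan [] = [] := by rw [bScan]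

theorem bScan_k1 (u : List Char) : bScan (K1 ++ u) = V1 ++ bScan u := by
  have h : K1 = ['i', ' ', 'w', 'a', 'n', 't'] := by decide
  rw [h]
  simp only [List.cons_append, List.nil_append]
  rw [bScan]
  simp [List.isPrefixOf, V1]

theorem bScan_k2 (u : List Char) : bScan (K2 ++ u) = V2 ++ bScan u := by
  have h : K2 = ['g', 'i', 'v', 'e', ' ', 'm', 'e'] := by decide
  rw [h]
  simp only [List.cons_append, List.nil_append]
  rw [bScan]
  simp [List.isPrefixOf, V2]

theorem bScan_k3 (u : List Char) : bScan (K3 ++ u) = V3 ++ bScan u := by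
  have h : K3 = ['t', 'e', 'l', 'l', ' ', 'm', 'e'] := by decide
  rw [h]
  simp only [List.cons_append, List.nil_append]
  rw [bScan]
  simp [List.isPrefixOf, V3]

theorem bScan_k4 (u : List Char) : bScan (K4 ++ u) = V4 ++ bScan u := by
  have h : K4 = ['s', 'e', 'n', 'd', ' ', 'm', 'e'] := by decide
  rw [h]
  simp only [List.cons_append, List.nil_append]
  rw [bScan]
  simp [List.isPrefixOf, V4]

theorem bScan_k5 (u : List Char) : bScan (K5 ++ u) = V5 ++ bScan u := by
  have h : K5 = ['s', 'h', 'o', 'w', ' ', 'm', 'e'] := by decide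
  rw [h]
  simp only [List.cons_append, List.nil_append]
  rw [bScan]
  simp [List.isPrefixOf, V5]

theorem bScan_none (c : Char) (t : List Char) (h1 : ¬ K1 <+: (c :: t)) (h2 : ¬ K2 <+: (c :: t))
    (h3 : ¬ K3 <+: (c :: t)) (h4 : ¬ K4 <+: (c :: t)) (h5 : ¬ K5 <+: (c :: t)) :
    bScan (c :: t) = c :: bScan t := by
  rw [bScan]
  rw [if_neg (by simpa [List.isPrefixOf_iff_prefix, K1] using h1),
      if_neg (by simpa [List.isPrefixOf_iff_prefix, K2] using h2),
      if_neg (by simpa [List.isPrefixOf_iff_prefix, K3] using h3),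
      if_neg (by simpa [List.isPrefixOf_iff_prefix, K4] using h4),
      if_neg (by simpa [List.isPrefixOf_iff_prefix, K5] using h5)]

-- the five sequential replaces on a text that starts with key i: emit value i and continue
theorem seq_k1 (u : List Char) : seqL (K1 ++ u) = V1 ++ seqL u := by
  unfold seqL
  rw [repl_append_self K1 V1 u (by decide),
      repl_skip K2 V2 V1 (by decide) _, repl_skip K3 V3 V1 (by decide) _,
      repl_skip K4 V4 V1 (by decide) _, repl_skip K5 V5 V1 (by decide) _]

theorem seq_k2 (u : List Char) : seqL (K2 ++ u) = V2 ++ seqL u := by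
  unfold seqL
  rw [repl_skip K1 V1 K2 (by decide) u,
      repl_append_self K2 V2 _ (by decide),
      repl_skip K3 V3 V2 (by decide) _, repl_skip K4 V4 V2 (by decide) _,
      repl_skip K5 V5 V2 (by decide) _]

theorem seq_k3 (u : List Char) : seqL (K3 ++ u) = V3 ++ seqL u := by
  unfold seqL
  rw [repl_skip K1 V1 K3 (by decide) u, repl_skip K2 V2 K3 (by decide) _,
      repl_append_self K3 V3 _ (by decide),
      repl_skip K4 V4 V3 (by decide) _, repl_skip K5 V5 V3 (by decide) _]

theorem seq_k4 (u : List Char) : seqL (K4 ++ u) = V4 ++ seqL u := by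
  unfold seqL
  rw [repl_skip K1 V1 K4 (by decide) u, repl_skip K2 V2 K4 (by decide) _,
      repl_skip K3 V3 K4 (by decide) _,
      repl_append_self K4 V4 _ (by decide),
      repl_skip K5 V5 V4 (by decide) _]

theorem seq_k5 (u : List Char) : seqL (K5 ++ u) = V5 ++ seqL u := by
  unfold seqL
  rw [repl_skip K1 V1 K5 (by decide) u, repl_skip K2 V2 K5 (by decide) _,
      repl_skip K3 V3 K5 (by decide) _, repl_skip K4 V4 K5 (by decide) _,
      repl_append_self K5 V5 _ (by decide)]

theorem seq_none (c : Char) (t : List Char) (h1 : ¬ K1 <+: (c :: t)) (h2 : ¬ K2 <+: (c :: t))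
    (h3 : ¬ K3 <+: (c :: t)) (h4 : ¬ K4 <+: (c :: t)) (h5 : ¬ K5 <+: (c :: t)) :
    seqL (c :: t) = c :: seqL t := by
  have hK : ∀ (k v k' : List Char), noReintro k' v = true → k' ≠ [] →
      ∀ s, ¬ k' <+: s → ¬ k' <+: repl k v s :=
    fun k v k' h hk s hs => repl_head k v k' h s.length s k' le_rfl List.suffix_rfl hk hs
  have e1 : repl K1 V1 (c :: t) = c :: repl K1 V1 t := repl_neg K1 V1 c t h1
  have n2 : ¬ K2 <+: repl K1 V1 (c :: t) := hK K1 V1 K2 (by decide) (by decide) _ h2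
  have e2 : repl K2 V2 (repl K1 V1 (c :: t)) = c :: repl K2 V2 (repl K1 V1 t) := by
    rw [e1] at n2 ⊢
    exact repl_neg K2 V2 c _ n2
  have n3 : ¬ K3 <+: repl K2 V2 (repl K1 V1 (c :: t)) :=
    hK K2 V2 K3 (by decide) (by decide) _ (hK K1 V1 K3 (by decide) (by decide) _ h3)
  have e3 : repl K3 V3 (repl K2 V2 (repl K1 V1 (c :: t)))
      = c :: repl K3 V3 (repl K2 V2 (repl K1 V1 t)) := by
    rw [e2] at n3 ⊢
    exact repl_neg K3 V3 c _ n3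
  have n4 : ¬ K4 <+: repl K3 V3 (repl K2 V2 (repl K1 V1 (c :: t))) :=
    hK K3 V3 K4 (by decide) (by decide) _
      (hK K2 V2 K4 (by decide) (by decide) _ (hK K1 V1 K4 (by decide) (by decide) _ h4))
  have e4 : repl K4 V4 (repl K3 V3 (repl K2 V2 (repl K1 V1 (c :: t))))
      = c :: repl K4 V4 (repl K3 V3 (repl K2 V2 (repl K1 V1 t))) := by
    rw [e3] at n4 ⊢
    exact repl_neg K4 V4 c _ n4
  have n5 : ¬ K5 <+: repl K4 V4 (repl K3 V3 (repl K2 V2 (repl K1 V1 (c :: t)))) :=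
    hK K4 V4 K5 (by decide) (by decide) _
      (hK K3 V3 K5 (by decide) (by decide) _
        (hK K2 V2 K5 (by decide) (by decide) _ (hK K1 V1 K5 (by decide) (by decide) _ h5)))
  have e5 : repl K5 V5 (repl K4 V4 (repl K3 V3 (repl K2 V2 (repl K1 V1 (c :: t)))))
      = c :: repl K5 V5 (repl K4 V4 (repl K3 V3 (repl K2 V2 (repl K1 V1 t)))) := by
    rw [e4] at n5 ⊢
    exact repl_neg K5 V5 c _ n5
  unfold seqL
  exact e5

theorem seqL_eq_bScan : ∀ n (l : List Char), l.length ≤ n → seqL l = bScan l := by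
  intro n
  induction n with
  | zero =>
    intro l hl
    have : l = [] := List.eq_nil_of_length_eq_zero (Nat.le_zero.mp hl)
    subst this
    rw [bScan_nil]
    unfold seqL
    simp [repl_nil]
  | succ m ih =>
    intro l hl
    by_cases h1 : K1 <+: l
    · obtain ⟨u, rfl⟩ := h1
      have hu : u.length ≤ m := by
        have hk : K1.length = 6 := by decide
        simp [List.length_append, hk] at hl
        omega
      rw [seq_k1, bScan_k1, ih u hu]
    · by_cases h2 : K2 <+: l
      · obtain ⟨u, rfl⟩ := h2
        have hu : u.length ≤ m := by
          have hk : K2.length = 7 := by decide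
          simp [List.length_append, hk] at hl
          omega
        rw [seq_k2, bScan_k2, ih u hu]
      · by_cases h3 : K3 <+: l
        · obtain ⟨u, rfl⟩ := h3
          have hu : u.length ≤ m := by
            have hk : K3.length = 7 := by decide
            simp [List.length_append, hk] at hl
            omega
          rw [seq_k3, bScan_k3, ih u hu]
        · by_cases h4 : K4 <+: l
          · obtain ⟨u, rfl⟩ := h4
            have hu : u.length ≤ m := by
              have hk : K4.length = 7 := by decide
              simp [List.length_append, hk] at hl
              omega
            rw [seq_k4, bScan_k4, ih u hu]
          · by_cases h5 : K5 <+: l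
            · obtain ⟨u, rfl⟩ := h5
              have hu : u.length ≤ m := by
                have hk : K5.length = 7 := by decide
                simp [List.length_append, hk] at hl
                omega
              rw [seq_k5, bScan_k5, ih u hu]
            · match l with
              | [] =>
                rw [bScan_nil]
                unfold seqL
                simp [repl_nil]
              | c :: t =>
                rw [seq_none c t h1 h2 h3 h4 h5, bScan_none c t h1 h2 h3 h4 h5,
                  ih t (by simp at hl; omega)]

theorem rephrase_text_unfold (text : String) :
    rephrase_text text = pyCapitalize (PySem.Str.replace (PySem.Str.replace (PySem.Str.replace
      (PySem.Str.replace (PySem.Str.replace text "i want" "I would like")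
        "give me" "Please provide") "tell me" "Could you tell me")
      "send me" "Kindly send") "show me" "Please show") := by
  rw [rephrase_text]
  have hi : (((((PySem.Dict.empty.insert "i want" "I would like").insert
      "give me" "Please provide").insert
      "tell me" "Could you tell me").insert
      "send me" "Kindly send").insert
      "show me" "Please show").items
      = [("i want", "I would like"), ("give me", "Please provide"), ("tell me", "Could you tell me"),
         ("send me", "Kindly send"), ("show me", "Please show")] := by decide
  rw [hi]
  simp [List.foldl]

-- ===== VERDICT (by name: the statement is the Claim_ definition above) =====
theorem rephrase_text_spec : Claim_equal_rephrase_text := by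
  intro text _
  unfold Spec_rephrase_text
  have hCL : (PySem.Str.replace (PySem.Str.replace (PySem.Str.replace
      (PySem.Str.replace (PySem.Str.replace text "i want" "I would like")
        "give me" "Please provide") "tell me" "Could you tell me")
      "send me" "Kindly send") "show me" "Please show").toList = seqL text.toList := by
    simp only [PySem.Str.toList_replace]
    rw [replace_eq_repl _ _ _ (by decide), replace_eq_repl _ _ _ (by decide),
        replace_eq_repl _ _ _ (by decide), replace_eq_repl _ _ _ (by decide),
        replace_eq_repl _ _ _ (by decide)]
    rfl
  rw [rephrase_text_unfold, rephrase_text_alt]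
  unfold pyCapitalize
  rw [hCL, seqL_eq_bScan text.toList.length text.toList le_rfl]
  simp
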